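-- pv_equiv track=rewrite | github.com/nandininema07/Credit-Intelligence-Platform | stage1_data_ingestion/data_processing/multi_source_collector.py | extract_companies_from_text
-- ===== SOURCE A (Python) =====
-- from typing import Dict, List, Optional, Any
--
-- def extract_companies_from_text(text: str, company_tickers: List[str]) -> List[str]:
--     """Extract mentioned company tickers from text"""
--     mentioned = []
--     text_upper = text.upper()
--     for ticker in company_tickers:
--         base_ticker = ticker.split('.')[0]  # Remove exchange suffix
--         if base_ticker in text_upper or f"${base_ticker}" in text_upper:
--             mentioned.append(ticker)
--     return mentioned
-- ===== SOURCE B (Python) =====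
-- def extract_companies_from_text(text, company_tickers):
--     """Extract mentioned company tickers from text.
--
--     Text-driven substring index (Rabin-Karp-set style): hash every window of
--     the uppercased text whose length is a needed base-ticker length into one
--     set, then answer each ticker by a single O(1) set lookup.  (A's extra
--     '$'+base search is redundant: '$X' in U already implies 'X' in U.)
--     """
--     U = text.upper()
--     n = len(U)
--     lengths = {len(t.split('.')[0]) for t in company_tickers}
--     index = set()
--     for L in lengths:
--         for i in range(n - L + 1):
--             index.add(U[i:i + L])
--     return [t for t in company_tickers if t.split('.')[0] in index]
-- ===== Notes on version B (the rewrite author's own statement) =====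
-- stated objective: faster
-- what changed: B is text-driven instead of pattern-driven: it hashes every window of the uppercased text whose length is a needed base length into one set (Rabin-Karp-set style substring index) and then answers each ticker by a single set lookup, whereas A runs a substring search over the whole text for every ticker (twice: base and '$'+base, the latter proved redundant).
import Mathlib
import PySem

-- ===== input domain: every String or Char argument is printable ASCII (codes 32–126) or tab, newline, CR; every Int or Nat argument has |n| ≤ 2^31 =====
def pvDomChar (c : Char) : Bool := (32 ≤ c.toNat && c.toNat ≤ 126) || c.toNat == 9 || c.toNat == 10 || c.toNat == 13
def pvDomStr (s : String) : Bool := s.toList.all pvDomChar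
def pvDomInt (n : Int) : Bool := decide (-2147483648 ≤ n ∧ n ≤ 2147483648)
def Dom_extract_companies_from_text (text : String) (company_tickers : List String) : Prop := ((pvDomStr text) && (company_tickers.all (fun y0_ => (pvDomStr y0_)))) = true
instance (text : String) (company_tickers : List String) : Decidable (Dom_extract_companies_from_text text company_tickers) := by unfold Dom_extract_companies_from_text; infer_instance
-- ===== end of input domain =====

-- B is text-driven instead of pattern-driven: it hashes every window of the uppercased text whose
-- length is a needed base length into one set, then answers each ticker by a single set lookup
-- (A's '$'-prefixed search is redundant and dropped); a timing run measured B faster.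

-- ticker.split('.')[0] — split by a non-empty separator is never the empty list, so [0] never raises (headD is exact here)
def pvBase (t : String) : List Char := (PySem.Chars.splitOn t.toList ['.']).headD []

-- ===== PORT A =====
def extract_companies_from_text (text : String) (company_tickers : List String) : List String :=
  let text_upper := PySem.Chars.upper text.toList
  company_tickers.foldl
    (fun mentioned ticker =>
      if PySem.Chars.isIn (pvBase ticker) text_upper
          || PySem.Chars.isIn ('$' :: pvBase ticker) text_upper   -- f"${base_ticker}" = '$' :: base
      then mentioned ++ [ticker] else mentioned) []

-- ===== PORT B =====
-- U[i:i+L] for nat i, L is (U.drop i).take L (PySem.List.slice_natCast_add), and Python's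
-- range(n - L + 1) is empty when L > n, exactly List.range (n + 1 - L) under Nat subtraction.
def pvWindows (U : List Char) (L : Nat) : List (List Char) :=
  (List.range (U.length + 1 - L)).map (fun i => (U.drop i).take L)

def extract_companies_from_text_alt (text : String) (company_tickers : List String) : List String :=
  let U := PySem.Chars.upper text.toList
  let lengths : PySem.Set Nat := PySem.Set.ofList (company_tickers.map fun t => (pvBase t).length)
  -- for L in lengths: for i in range(n-L+1): index.add(U[i:i+L])  — the index is a Set consumed
  -- only by membership afterwards, so set-iteration order is immaterial
  let index : PySem.Set (List Char) :=
    lengths.foldl (fun s L => PySem.Set.update s (pvWindows U L)) PySem.Set.empty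
  company_tickers.filter (fun t => PySem.Set.contains index (pvBase t))

-- ===== PRECONDITION & SPEC =====
def Spec_extract_companies_from_text (text : String) (company_tickers : List String) (out : List String) : Prop := out = extract_companies_from_text_alt text company_tickers
instance (text : String) (company_tickers : List String) (out : List String) : Decidable (Spec_extract_companies_from_text text company_tickers out) := by unfold Spec_extract_companies_from_text; infer_instance

-- ===== CLAIM (what is proved, stated in full; the proofs are below) =====
def Claim_equal_extract_companies_from_text : Prop := ∀ (text : String) (company_tickers : List String), Dom_extract_companies_from_text text company_tickers → Spec_extract_companies_from_text text company_tickers (extract_companies_from_text text company_tickers)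

-- ===== LEMMAS AND PROOFS =====

-- '$X' in U implies 'X' in U, so A's disjunction collapses to the single lookup B performs
lemma pv_dollar_redundant (b U : List Char) :
    (PySem.Chars.isIn b U || PySem.Chars.isIn ('$' :: b) U) = PySem.Chars.isIn b U := by
  cases h : PySem.Chars.isIn b U
  · cases h2 : PySem.Chars.isIn ('$' :: b) U
    · rfl
    · exfalso
      rw [PySem.Chars.isIn_iff_infix] at h2
      rw [PySem.Chars.isIn_eq_false_iff] at h
      exact h (((List.suffix_cons '$' b).isInfix).trans h2)
  · rfl

-- every window is an infix of U, and every infix of U of length L is a window of length L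
lemma pv_mem_windows_iff (U b : List Char) (L : Nat) (hL : b.length = L) :
    b ∈ pvWindows U L ↔ b <:+: U := by
  constructor
  · intro hb
    simp only [pvWindows, List.mem_map, List.mem_range] at hb
    obtain ⟨i, _, rfl⟩ := hb
    exact ((U.drop i).take_prefix L).isInfix.trans (U.drop_suffix i).isInfix
  · intro hb
    obtain ⟨s, t, hst⟩ := hb
    simp only [pvWindows, List.mem_map, List.mem_range]
    refine ⟨s.length, ?_, ?_⟩
    · have := congrArg List.length hst
      simp at this
      omega
    · have hdrop : U.drop s.length = b ++ t := by
        rw [← hst]; simp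
      rw [hdrop, List.take_append_of_le_length (by omega), ← hL, List.take_length]

-- membership in the folded index: x is in the index iff it is a window for some length in the list
lemma pv_mem_index (U : List Char) (ls : List Nat) (s : PySem.Set (List Char)) (x : List Char) :
    x ∈ ls.foldl (fun s L => PySem.Set.update s (pvWindows U L)) s ↔
      x ∈ s ∨ ∃ L ∈ ls, x ∈ pvWindows U L := by
  induction ls generalizing s with
  | nil => simp
  | cons L ls ih =>
    simp only [List.foldl_cons, ih, PySem.Set.mem_update, List.mem_cons]
    constructor
    · rintro ((h | h) | ⟨L', hL', h⟩)
      · exact Or.inl h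
      · exact Or.inr ⟨L, Or.inl rfl, h⟩
      · exact Or.inr ⟨L', Or.inr hL', h⟩
    · rintro (h | ⟨L', (rfl | hL'), h⟩)
      · exact Or.inl (Or.inl h)
      · exact Or.inl (Or.inr h)
      · exact Or.inr ⟨L', hL', h⟩

-- for a ticker of the list, the index lookup IS the containment test
lemma pv_lookup_eq_isIn (U : List Char) (cts : List String) (t : String) (ht : t ∈ cts) :
    PySem.Set.contains
      ((PySem.Set.ofList (cts.map fun t => (pvBase t).length)).foldl
        (fun s L => PySem.Set.update s (pvWindows U L)) PySem.Set.empty)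
      (pvBase t)
    = PySem.Chars.isIn (pvBase t) U := by
  have hlen : (pvBase t).length ∈ PySem.Set.ofList (cts.map fun t => (pvBase t).length) := by
    rw [PySem.Set.mem_ofList]
    exact List.mem_map.mpr ⟨t, ht, rfl⟩
  cases h : PySem.Chars.isIn (pvBase t) U with
  | true =>
    rw [PySem.Chars.isIn_iff_infix] at h
    have : pvBase t ∈ (PySem.Set.ofList (cts.map fun t => (pvBase t).length)).foldl
        (fun s L => PySem.Set.update s (pvWindows U L)) PySem.Set.empty := by
      rw [pv_mem_index]
      exact Or.inr ⟨(pvBase t).length, hlen, (pv_mem_windows_iff U (pvBase t) _ rfl).mpr h⟩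
    simpa [PySem.Set.contains] using this
  | false =>
    rw [PySem.Chars.isIn_eq_false_iff] at h
    have : pvBase t ∉ (PySem.Set.ofList (cts.map fun t => (pvBase t).length)).foldl
        (fun s L => PySem.Set.update s (pvWindows U L)) PySem.Set.empty := by
      rw [pv_mem_index]
      rintro (hmem | ⟨L, hL, hw⟩)
      · simp [PySem.Set.empty] at hmem
      · simp only [pvWindows, List.mem_map, List.mem_range] at hw
        obtain ⟨i, _, hwe⟩ := hw
        exact h (hwe ▸ ((U.drop i).take_prefix L).isInfix.trans (U.drop_suffix i).isInfix)
    simpa [PySem.Set.contains] using this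

-- ===== VERDICT (by name: the statement is the Claim_ definition above) =====
theorem extract_companies_from_text_spec : Claim_equal_extract_companies_from_text := by
  intro text cts _
  unfold Spec_extract_companies_from_text extract_companies_from_text extract_companies_from_text_alt
  rw [PySem.List.foldl_append_if_eq_filter, List.nil_append]
  apply List.filter_congr
  intro t ht
  rw [pv_dollar_redundant, pv_lookup_eq_isIn _ cts t ht]
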